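-- pv_equiv track=rewrite | github.com/mskozlova/advent_of_code | 2023/day14/day14_pt2.py | move_row_west
-- ===== SOURCE A (Python) =====
-- def move_row_west(map, row_num):
--     new_row = []
--     total_cols = len(map[0])
--     last_occupied_col = -1
--     load = 0
--
--     for col_num in range(total_cols):
--         symbol = map[row_num][col_num]
--
--         if symbol == ".":
--             pass
--         elif symbol == "O":
--             last_occupied_col += 1
--             load += total_cols - last_occupied_col
--             new_row.append("O")
--         else:  # symbol == "#"
--             while len(new_row) < col_num:
--                 new_row.append(".")
--
--             new_row.append("#")
--             last_occupied_col = col_num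
--
--     while len(new_row) < total_cols:
--         new_row.append(".")
--
--     for col_num in range(total_cols):
--         map[row_num][col_num] = new_row[col_num]
--
--     return load
-- ===== SOURCE B (Python) =====
-- def move_row_west(map, row_num):
--     # Segment decomposition: split the row at walls, pack each segment's rocks
--     # to its left edge and add their load in closed form. Mutates map[row_num]
--     # in place like the original.
--     total = len(map[0])
--     row = map[row_num]
--     cells = row[:total]
--     load = 0
--     new = []
--     seg_start = 0
--     for j in range(total + 1):
--         if j == total or (cells[j] != "." and cells[j] != "O"):
--             c = cells[seg_start:j].count("O")
--             load += c * total - c * seg_start - c * (c - 1) // 2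
--             new.extend(["O"] * c + ["."] * (j - seg_start - c))
--             if j < total:
--                 new.append("#")
--             seg_start = j + 1
--     row[:total] = new
--     return load
-- ===== Notes on version B (the rewrite author's own statement) =====
-- stated objective: alternative
-- what changed: Replaces the per-cell rolling simulation (last_occupied_col counter plus pad-with-dots while loops) by a wall-delimited segment decomposition: each segment's rock count is taken once and its load added in closed form c*total - c*seg_start - c*(c-1)//2, the packed segment being rebuilt wholesale.
-- outside the precondition, e.g. on move_row_west([[]], 1): A returns 0, B raises IndexError
import Mathlib
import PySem

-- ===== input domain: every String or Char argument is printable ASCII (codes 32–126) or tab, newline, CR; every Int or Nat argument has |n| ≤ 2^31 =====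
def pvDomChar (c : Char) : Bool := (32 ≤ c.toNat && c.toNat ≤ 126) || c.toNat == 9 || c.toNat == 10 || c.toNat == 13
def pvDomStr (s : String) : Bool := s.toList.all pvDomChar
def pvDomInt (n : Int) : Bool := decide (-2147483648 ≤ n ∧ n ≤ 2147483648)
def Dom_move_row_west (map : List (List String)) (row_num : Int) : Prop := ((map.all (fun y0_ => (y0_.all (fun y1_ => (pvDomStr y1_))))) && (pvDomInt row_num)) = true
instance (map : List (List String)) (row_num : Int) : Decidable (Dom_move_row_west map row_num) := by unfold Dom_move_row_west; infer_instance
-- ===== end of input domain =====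

-- B replaces A's per-cell rolling simulation by a wall-delimited segment decomposition
-- with a closed-form load per segment (alternative decomposition, same O(n) cost).
-- Both Pythons mutate map[row_num] identically in place; the equivalence proved here is
-- about the RETURN value (the load) only.

-- ===== PORT A =====
-- `while len(new_row) < col_num: new_row.append(".")`
def padA (l : List String) (col : Int) : List String :=
  l ++ List.replicate (col - (l.length : Int)).toNat "."

-- loop body over (new_row, last_occupied_col, load)
def stepA (row : List String) (total : Int) (st : List String × Int × Int) (col : Int) :
    List String × Int × Int :=
  let symbol := PySem.List.pyGetD row col ""
  if symbol = "." then st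
  else if symbol = "O" then (st.1 ++ ["O"], st.2.1 + 1, st.2.2 + (total - (st.2.1 + 1)))
  else (padA st.1 col ++ ["#"], col, st.2.2)

-- final pad + write-back loop only mutate map (not representable): return value is load
def move_row_west (map : List (List String)) (row_num : Int) : Int :=
  let total : Int := PySem.List.len ((PySem.List.pyGet? map 0).getD [])
  let row : List String := (PySem.List.pyGet? map row_num).getD []
  ((PySem.List.pyRange 0 total).foldl (stepA row total) ([], -1, 0)).2.2

-- ===== PORT B =====
-- loop body over (seg_start, new, load)
def stepB (cells : List String) (total : Int) (st : Int × List String × Int) (j : Int) :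
    Int × List String × Int :=
  if j = total ∨ (PySem.List.pyGetD cells j "" ≠ "." ∧ PySem.List.pyGetD cells j "" ≠ "O") then
    let c : Int := (PySem.List.count (PySem.List.slice cells (some st.1) (some j)) "O" : Int)
    (j + 1,
     st.2.1 ++ List.replicate c.toNat "O" ++ List.replicate (j - st.1 - c).toNat "."
       ++ (if j < total then ["#"] else []),
     st.2.2 + (c * total - c * st.1 - PySem.Int.floordiv (c * (c - 1)) 2))
  else st

-- `row[:total] = new` only mutates map (not representable): return value is load
def move_row_west_alt (map : List (List String)) (row_num : Int) : Int :=
  let total : Int := PySem.List.len ((PySem.List.pyGet? map 0).getD [])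
  let row : List String := (PySem.List.pyGet? map row_num).getD []
  let cells := PySem.List.slice row none (some total)
  ((PySem.List.pyRange 0 (total + 1)).foldl (stepB cells total) (0, [], 0)).2.2

-- ===== PRECONDITION & SPEC =====
-- Pre_: map nonempty (len(map[0])), row_num a valid Python index, and the indexed row at
-- least as long as map[0] (A indexes it up to there). Pre_ also excludes inputs whose first
-- row is empty while row_num is out of range: A's loops then run zero times and it returns 0
-- without ever indexing map[row_num], whereas B fetches map[row_num] up front and raises
-- IndexError there.
def Pre_move_row_west (map : List (List String)) (row_num : Int) : Prop :=
  map ≠ [] ∧ PySem.Raise.InRange map.length row_num ∧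
    map.headI.length ≤ ((PySem.List.pyGet? map row_num).getD []).length

instance (map : List (List String)) (row_num : Int) : Decidable (Pre_move_row_west map row_num) := by
  unfold Pre_move_row_west; infer_instance

def pvWitness_move_row_west : List (List String) × Int := ([["O", ".", "#", "O", "."]], 0)

def Spec_move_row_west (map : List (List String)) (row_num : Int) (out : Int) : Prop := out = move_row_west_alt map row_num
instance (map : List (List String)) (row_num : Int) (out : Int) : Decidable (Spec_move_row_west map row_num out) := by unfold Spec_move_row_west; infer_instance

-- ===== CLAIM (what is proved, stated in full; the proofs are below) =====
def Claim_equal_move_row_west : Prop := ∀ (map : List (List String)) (row_num : Int), Dom_move_row_west map row_num → Pre_move_row_west map row_num → Spec_move_row_west map row_num (move_row_west map row_num)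

-- ===== LEMMAS AND PROOFS =====

lemma tri_succ (c : Nat) : (c + 1) * c / 2 = c * (c - 1) / 2 + c := by
  cases c with
  | zero => rfl
  | succ k =>
    have h : (k + 2) * (k + 1) = (k + 1) * k + (k + 1) * 2 := by ring
    calc (k + 1 + 1) * (k + 1) / 2 = ((k + 1) * k + 2 * (k + 1)) / 2 := by rw [← Nat.mul_comm (k+1) 2, ← h]
      _ = (k + 1) * k / 2 + (k + 1) := Nat.add_mul_div_left ((k+1)*k) (k+1) (by norm_num)
      _ = (k + 1) * (k + 1 - 1) / 2 + (k + 1) := by simp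

lemma floordiv_tri (c : Nat) :
    PySem.Int.floordiv ((c : Int) * ((c : Int) - 1)) 2 = ((c * (c - 1) / 2 : Nat) : Int) := by
  cases c with
  | zero => decide
  | succ k =>
    have h : ((k + 1 : Nat) : Int) * (((k + 1 : Nat) : Int) - 1) = (((k + 1) * k : Nat) : Int) := by
      push_cast; ring
    rw [h]
    exact_mod_cast PySem.Int.floordiv_natCast ((k + 1) * k) 2

-- the invariant tying A's per-cell state to B's per-segment state after j loop steps
lemma inv_lemma (row : List String) (N : Nat) (hN : N ≤ row.length) :
    ∀ j : Nat, j ≤ N →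
    ∃ (s c : Nat) (new : List String) (load : Int),
      s + c ≤ j ∧ new.length = s ∧
      c = List.count "O" (((row.take N).drop s).take (j - s)) ∧
      (PySem.List.pyRange 0 (j : Int)).foldl (stepB (row.take N) (N : Int)) (0, [], 0)
        = ((s : Int), new, load) ∧
      (PySem.List.pyRange 0 (j : Int)).foldl (stepA row (N : Int)) ([], -1, 0)
        = (new ++ List.replicate c "O", (s : Int) - 1 + (c : Int),
           load + ((c : Int) * (N : Int) - (c : Int) * (s : Int) - ((c * (c - 1) / 2 : Nat) : Int))) := by
  intro j
  induction j with
  | zero =>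
    intro _
    refine ⟨0, 0, [], 0, by omega, rfl, by simp, ?_, ?_⟩
    · simp [PySem.List.pyRange_one_eq_nil]
    · norm_num [PySem.List.pyRange_one_eq_nil]
  | succ j ih =>
    intro hj1
    have hj : j < N := hj1
    obtain ⟨s, c, new, load, h1, h2, h3, h4, h5⟩ := ih (Nat.le_of_lt hj)
    have hsj : s ≤ j := by omega
    have hrow : j < row.length := lt_of_lt_of_le hj hN
    have hclen : (row.take N).length = N := by rw [List.length_take]; omega
    have hrange : PySem.List.pyRange 0 ((j+1:Nat):Int) = PySem.List.pyRange 0 (j:Int) ++ [(j:Int)] := by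
      have hcast : ((j+1 : Nat) : Int) = (j : Int) + 1 := by push_cast; ring
      rw [hcast]; exact PySem.List.pyRange_one_succ_right (by positivity)
    have hgetR : PySem.List.pyGetD row ((j:Nat):Int) "" = row[j] := by
      rw [PySem.List.pyGetD_natCast]; exact List.getD_eq_getElem _ _ hrow
    have hcj : (row.take N)[j]'(by omega) = row[j] := List.getElem_take
    have hgetC : PySem.List.pyGetD (row.take N) ((j:Nat):Int) "" = row[j] := by
      rw [PySem.List.pyGetD_natCast, List.getD_eq_getElem _ _ (by omega), hcj]
    have htake : ∀ v : String, List.count v (((row.take N).drop s).take (j + 1 - s))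
        = List.count v (((row.take N).drop s).take (j - s)) + List.count v [row[j]] := by
      intro v
      have he : j + 1 - s = (j - s) + 1 := by omega
      have hg : ((row.take N).drop s)[j - s]? = some (row[j]) := by
        rw [List.getElem?_drop]
        have hsum : s + (j - s) = j := by omega
        rw [hsum, List.getElem?_eq_getElem (by omega), hcj]
      rw [he, List.take_add_one, hg, List.count_append]
      rfl
    rw [hrange, List.foldl_append, List.foldl_append, h4, h5]
    simp only [List.foldl_cons, List.foldl_nil]
    by_cases hdot : row[j] = "."
    · -- '.' : both loop bodies leave the state unchanged
      refine ⟨s, c, new, load, by omega, h2, ?_, ?_, ?_⟩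
      · rw [htake, h3]; simp [hdot]
      · simp only [stepB]
        rw [if_neg]
        rintro (hl | ⟨ha, _⟩)
        · exact absurd (by exact_mod_cast hl) (by omega : j ≠ N)
        · rw [hgetC] at ha; exact ha hdot
      · simp only [stepA]
        rw [hgetR, if_pos hdot]
    · by_cases hO : row[j] = "O"
      · -- 'O' : A places a rock, B's state is unchanged
        refine ⟨s, c + 1, new, load, by omega, h2, ?_, ?_, ?_⟩
        · rw [htake, h3]; simp [hO]
        · simp only [stepB]
          rw [if_neg]
          rintro (hl | ⟨_, hb⟩)
          · exact absurd (by exact_mod_cast hl) (by omega : j ≠ N)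
          · rw [hgetC] at hb; exact hb hO
        · simp only [stepA]
          rw [hgetR, if_neg (by rw [hO]; decide), if_pos hO]
          refine Prod.ext ?_ (Prod.ext (by push_cast; ring) ?_)
          · simp only
            rw [List.append_assoc, ← List.replicate_succ']
          · simp only
            have htri : ((c + 1) * (c + 1 - 1) / 2 : Nat) = (c * (c - 1) / 2) + c := by
              simpa using tri_succ c
            rw [htri]; push_cast; ring
      · -- wall : A pads and records the wall, B closes the segment in closed form
        have hc : ((PySem.List.count (PySem.List.slice (row.take N) (some ((s:Nat):Int)) (some ((j:Nat):Int))) "O" : Nat) : Int) = (c : Int) := by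
          rw [PySem.List.slice_natCast, PySem.List.count_eq, ← h3]
        refine ⟨j + 1, 0, new ++ List.replicate c "O" ++ List.replicate (j - s - c) "." ++ ["#"],
               load + ((c : Int) * (N : Int) - (c : Int) * (s : Int) - ((c * (c - 1) / 2 : Nat) : Int)),
               by omega, ?_, by simp, ?_, ?_⟩
        · simp [h2]; omega
        · simp only [stepB]
          rw [if_pos (Or.inr ⟨by rw [hgetC]; exact hdot, by rw [hgetC]; exact hO⟩)]
          rw [hc]
          have hn1 : ((j:Int) - (s:Int) - (c:Int)).toNat = j - s - c := by omega
          have hn2 : ((c:Int)).toNat = c := by omega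
          rw [hn1, hn2, if_pos (by exact_mod_cast hj : ((j:Nat):Int) < (N:Int)), floordiv_tri]
          refine Prod.ext (by push_cast; ring) (Prod.ext (by simp [List.append_assoc]) (by ring))
        · simp only [stepA]
          rw [hgetR, if_neg hdot, if_neg hO]
          refine Prod.ext ?_ (Prod.ext (by push_cast; ring) (by push_cast; ring))
          simp only [padA, List.length_append, h2, List.length_replicate]
          have hn : ((j:Int) - ((s + c : Nat) : Int)).toNat = j - s - c := by push_cast; omega
          rw [hn]
          simp [List.append_assoc]

-- ===== VERDICT (by name: the statement is the Claim_ definition above) =====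
theorem move_row_west_spec : Claim_equal_move_row_west := by
  unfold Claim_equal_move_row_west
  intro map row_num _ hpre
  obtain ⟨hne, hin, hlen⟩ := hpre
  cases map with
  | nil => exact absurd rfl hne
  | cons x xs =>
    have hN : x.length ≤ ((PySem.List.pyGet? (x :: xs) row_num).getD []).length := hlen
    unfold Spec_move_row_west move_row_west move_row_west_alt
    simp only [PySem.List.pyGet?_zero_cons, Option.getD_some, PySem.List.len_eq,
      PySem.List.slice_to_natCast]
    obtain ⟨s, c, new, load, h1, h2, h3, h4, h5⟩ :=
      inv_lemma ((PySem.List.pyGet? (x :: xs) row_num).getD []) x.length hN x.length le_rfl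
    rw [h5, PySem.List.pyRange_one_succ_right (Int.natCast_nonneg _), List.foldl_append, h4]
    simp only [List.foldl_cons, List.foldl_nil, stepB]
    rw [if_pos (Or.inl trivial)]
    have hc : ((PySem.List.count (PySem.List.slice (((PySem.List.pyGet? (x :: xs) row_num).getD []).take x.length) (some ((s:Nat):Int)) (some ((x.length:Nat):Int))) "O" : Nat) : Int) = (c:Int) := by
      rw [PySem.List.slice_natCast, PySem.List.count_eq, ← h3]
    rw [hc, floordiv_tri]
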